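-- pv_equiv track=rewrite | github.com/dominikjalowiecki/Programming-Projects | python/ex_numbers/skrypty.py | podaj_ciag_w_ktorym_nwd_jest_wieksze_od_jeden
-- ===== SOURCE A (Python) =====
-- def oblicz_najwiekszy_wspolny_dzielnik(a, b):
--     while a != b:
--         if a > b:
--             a -= b
--         else:
--             b -= a
--
--     return a
--
-- def podaj_ciag_w_ktorym_nwd_jest_wieksze_od_jeden(liczby):
--     pierwsza_liczba_ciagu = -1
--     dlugosc_ciagu = 1
--     najwiekszy_wspolny_dzielnik_ciagu = 0
--     wynik = [pierwsza_liczba_ciagu, dlugosc_ciagu, najwiekszy_wspolny_dzielnik_ciagu]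
--
--     idx = 0
--     while idx < len(liczby):
--         if dlugosc_ciagu == 1:
--             nwdc = oblicz_najwiekszy_wspolny_dzielnik(liczby[idx-1], liczby[idx])
--         else:
--             nwdc = oblicz_najwiekszy_wspolny_dzielnik(najwiekszy_wspolny_dzielnik_ciagu, liczby[idx])
--
--         if nwdc > 1:
--             if pierwsza_liczba_ciagu == -1:
--                 pierwsza_liczba_ciagu = liczby[idx-1]
--             najwiekszy_wspolny_dzielnik_ciagu = nwdc
--
--             dlugosc_ciagu += 1
--             idx += 1
--         else:
--             if dlugosc_ciagu > wynik[1]: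
--                 wynik = [pierwsza_liczba_ciagu, dlugosc_ciagu, najwiekszy_wspolny_dzielnik_ciagu]
--             if not oblicz_najwiekszy_wspolny_dzielnik(liczby[idx-1], liczby[idx]) > 1:
--                 idx += 1
--             pierwsza_liczba_ciagu = -1
--             dlugosc_ciagu = 1
--             najwiekszy_wspolny_dzielnik_ciagu = 0
--
--     if dlugosc_ciagu > wynik[1]:
--         wynik = [pierwsza_liczba_ciagu, dlugosc_ciagu, najwiekszy_wspolny_dzielnik_ciagu]
--
--     return wynik
-- ===== SOURCE B (Python) =====
-- def podaj_ciag_w_ktorym_nwd_jest_wieksze_od_jeden(liczby):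
--     # Scans maximal runs of adjacent elements sharing a common divisor > 1.
--     # Each element liczby[i] is paired with its predecessor liczby[i - 1];
--     # for i == 0 the predecessor is the last element, so the scan is anchored
--     # circularly.  Returns [first element of run, run length, gcd of run] for
--     # the longest run found, [-1, 1, 0] when there is none.
--     def nwd(a, b):
--         while b:
--             a, b = b, a % b
--         return a
--     best = [-1, 1, 0]
--     first, dl, g = -1, 1, 0
--     for i in range(len(liczby)):
--         if dl == 1:
--             t = nwd(liczby[i - 1], liczby[i])
--             if t > 1:
--                 first, dl, g = liczby[i - 1], 2, t
--         else:
--             t = nwd(g, liczby[i])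
--             if t > 1:
--                 dl, g = dl + 1, t
--             else:
--                 if dl > best[1]:
--                     best = [first, dl, g]
--                 t = nwd(liczby[i - 1], liczby[i])
--                 if t > 1:
--                     first, dl, g = liczby[i - 1], 2, t
--                 else:
--                     first, dl, g = -1, 1, 0
--     if dl > best[1]:
--         best = [first, dl, g]
--     return best
-- ===== Notes on version B (the rewrite author's own statement) =====
-- stated objective: faster
-- what changed: Replaces the subtraction GCD by the Euclidean modulo GCD and the retrying index-based while-loop by a single for-pass over the indices that restarts a run immediately from the predecessor pair, dropping the dead first==-1 check; intended as faster (O(n*log max) vs O(n*max)): a timing run could not measure a ratio because A timed out at n=16 where B returned.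
-- outside the precondition, e.g. on podaj_ciag_w_ktorym_nwd_jest_wieksze_od_jeden([0]): A returns [-1, 1, 0], B returns [-1, 1, 0]; on podaj_ciag_w_ktorym_nwd_jest_wieksze_od_jeden([-2, -2]): A returns [-1, 1, 0], B returns [-1, 1, 0]
import Mathlib
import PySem

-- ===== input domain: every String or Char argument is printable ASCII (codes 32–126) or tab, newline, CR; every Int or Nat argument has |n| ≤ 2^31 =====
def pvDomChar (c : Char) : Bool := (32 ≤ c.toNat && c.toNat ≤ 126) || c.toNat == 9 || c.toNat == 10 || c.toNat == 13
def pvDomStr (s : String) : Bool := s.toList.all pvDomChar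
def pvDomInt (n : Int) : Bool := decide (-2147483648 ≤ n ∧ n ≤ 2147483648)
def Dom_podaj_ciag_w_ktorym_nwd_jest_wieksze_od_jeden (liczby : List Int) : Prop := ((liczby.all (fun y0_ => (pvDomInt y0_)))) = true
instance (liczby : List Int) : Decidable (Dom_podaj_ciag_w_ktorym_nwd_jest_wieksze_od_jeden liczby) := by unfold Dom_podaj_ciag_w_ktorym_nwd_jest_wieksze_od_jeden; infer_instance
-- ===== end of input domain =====

-- B replaces A's subtraction GCD by the Euclidean modulo GCD and A's retrying
-- while-loop by a single for-pass over the indices; intended as faster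
-- (a timing run measured no ratio: A timed out at n=16 where B returned).

-- ===== PORT A =====
-- subtraction GCD; the Python loop diverges when an argument is ≤ 0 and the two differ,
-- so the port uses fuel a.natAbs + b.natAbs, which covers every terminating run on positives
def obliczF : Nat → Int → Int → Int
  | 0, a, _ => a
  | f + 1, a, b =>
    if a ≠ b then
      (if a > b then obliczF f (a - b) b else obliczF f a (b - a))
    else a

def oblicz_najwiekszy_wspolny_dzielnik (a b : Int) : Int :=
  obliczF (a.natAbs + b.natAbs) a b

-- the while-loop; idx is only ever 0..len inside Pre_, and it advances by at most one retry,
-- so fuel 2*len+1 covers every terminating run; the after-loop final check is the idx ≥ len exit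
def loopA (liczby : List Int) : Nat → Nat → Int → Int → Int → List Int → List Int
  | 0, _, _, _, _, wynik => wynik   -- fuel exhausted (unreachable under Pre_)
  | f + 1, idx, pierwsza, dl, g, wynik =>
    if idx < liczby.length then
      let nwdc :=
        if dl = 1 then
          oblicz_najwiekszy_wspolny_dzielnik
            (PySem.List.pyGetD liczby ((idx : Int) - 1) 0) (PySem.List.pyGetD liczby (idx : Int) 0)
        else
          oblicz_najwiekszy_wspolny_dzielnik g (PySem.List.pyGetD liczby (idx : Int) 0)
      if nwdc > 1 then
        let pierwsza' := if pierwsza = -1 then PySem.List.pyGetD liczby ((idx : Int) - 1) 0 else pierwsza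
        loopA liczby f (idx + 1) pierwsza' (dl + 1) nwdc wynik
      else
        let wynik' := if dl > PySem.List.pyGetD wynik 1 0 then [pierwsza, dl, g] else wynik
        let idx' :=
          if ¬ (oblicz_najwiekszy_wspolny_dzielnik
                  (PySem.List.pyGetD liczby ((idx : Int) - 1) 0)
                  (PySem.List.pyGetD liczby (idx : Int) 0) > 1)
          then idx + 1 else idx
        loopA liczby f idx' (-1) 1 0 wynik'
    else
      if dl > PySem.List.pyGetD wynik 1 0 then [pierwsza, dl, g] else wynik

def podaj_ciag_w_ktorym_nwd_jest_wieksze_od_jeden (liczby : List Int) : List Int :=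
  loopA liczby (2 * liczby.length + 1) 0 (-1) 1 0 [-1, 1, 0]

-- ===== PORT B =====
-- Euclidean modulo GCD: while b: a, b = b, a % b
def nwd (a b : Int) : Int :=
  if h : b = 0 then a else nwd b (PySem.Int.mod a b)
termination_by b.natAbs
decreasing_by
  rcases lt_trichotomy b 0 with hb | hb | hb
  · have := PySem.Int.mod_neg_bounds a hb
    omega
  · exact absurd hb h
  · have h1 := PySem.Int.mod_nonneg a hb
    have h2 := PySem.Int.mod_lt a hb
    omega

-- one iteration of B's for-loop at index i; state: (first, dl, g, best)
def altStep (liczby : List Int) (s : Int × Int × Int × List Int) (i : Int) :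
    Int × Int × Int × List Int :=
  let (first, dl, g, best) := s
  if dl = 1 then
    let t := nwd (PySem.List.pyGetD liczby (i - 1) 0) (PySem.List.pyGetD liczby i 0)
    if t > 1 then (PySem.List.pyGetD liczby (i - 1) 0, 2, t, best) else (first, dl, g, best)
  else
    let t := nwd g (PySem.List.pyGetD liczby i 0)
    if t > 1 then (first, dl + 1, t, best)
    else
      let best' := if dl > PySem.List.pyGetD best 1 0 then [first, dl, g] else best
      let t2 := nwd (PySem.List.pyGetD liczby (i - 1) 0) (PySem.List.pyGetD liczby i 0)
      if t2 > 1 then (PySem.List.pyGetD liczby (i - 1) 0, 2, t2, best')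
      else (-1, 1, 0, best')

def podaj_ciag_w_ktorym_nwd_jest_wieksze_od_jeden_alt (liczby : List Int) : List Int :=
  let r := (PySem.List.pyRange 0 (liczby.length : Int) 1).foldl
    (altStep liczby) (-1, 1, 0, [-1, 1, 0])
  if r.2.1 > PySem.List.pyGetD r.2.2.2 1 0 then [r.1, r.2.1, r.2.2.1] else r.2.2.2

-- ===== PRECONDITION & SPEC =====
-- Pre_ requires every element to be strictly positive: the subtraction GCD of A loops forever
-- whenever it is handed a non-positive argument different from the other one (e.g. on [5, 10, 0]),
-- and every element reaches it; it also excludes some lists with zero/negative elements on which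
-- A happens to return (each GCD call gets equal arguments), e.g. [0] — see the claim's cites.
def Pre_podaj_ciag_w_ktorym_nwd_jest_wieksze_od_jeden (liczby : List Int) : Prop :=
  ∀ y ∈ liczby, 0 < y
instance (liczby : List Int) : Decidable (Pre_podaj_ciag_w_ktorym_nwd_jest_wieksze_od_jeden liczby) := by unfold Pre_podaj_ciag_w_ktorym_nwd_jest_wieksze_od_jeden; infer_instance

def pvWitness_podaj_ciag_w_ktorym_nwd_jest_wieksze_od_jeden : List Int := [5, 4, 6, 9, 3, 7]

def Spec_podaj_ciag_w_ktorym_nwd_jest_wieksze_od_jeden (liczby : List Int) (out : List Int) : Prop := out = podaj_ciag_w_ktorym_nwd_jest_wieksze_od_jeden_alt liczby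
instance (liczby : List Int) (out : List Int) : Decidable (Spec_podaj_ciag_w_ktorym_nwd_jest_wieksze_od_jeden liczby out) := by unfold Spec_podaj_ciag_w_ktorym_nwd_jest_wieksze_od_jeden; infer_instance

-- ===== CLAIM (what is proved, stated in full; the proofs are below) =====
def Claim_equal_podaj_ciag_w_ktorym_nwd_jest_wieksze_od_jeden : Prop := ∀ (liczby : List Int), Dom_podaj_ciag_w_ktorym_nwd_jest_wieksze_od_jeden liczby → Pre_podaj_ciag_w_ktorym_nwd_jest_wieksze_od_jeden liczby → Spec_podaj_ciag_w_ktorym_nwd_jest_wieksze_od_jeden liczby (podaj_ciag_w_ktorym_nwd_jest_wieksze_od_jeden liczby)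

-- ===== LEMMAS AND PROOFS =====

lemma pyGetD_best (a b c : Int) : PySem.List.pyGetD [a, b, c] 1 0 = b := rfl

lemma nwd_eq_gcd (a b : Int) (ha : 0 ≤ a) (hb : 0 ≤ b) : nwd a b = Int.gcd a b := by
  rw [nwd]
  split
  · rename_i h
    subst h
    rw [Int.gcd_zero_right]
    omega
  · rename_i h
    have hbpos : 0 < b := by omega
    rw [PySem.Int.mod_eq_emod_of_pos hbpos,
        nwd_eq_gcd b (a % b) hb (Int.emod_nonneg a (by omega)),
        Int.gcd_comm, Int.gcd_emod]
termination_by b.natAbs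
decreasing_by
  have h1 := Int.emod_nonneg a (show b ≠ 0 by omega)
  have h2 := Int.emod_lt_of_pos a hbpos
  omega

lemma obliczF_eq_gcd : ∀ (f : Nat) (a b : Int), 0 < a → 0 < b → a.natAbs + b.natAbs ≤ f →
    obliczF f a b = Int.gcd a b := by
  intro f
  induction f with
  | zero => intro a b ha hb hf; omega
  | succ f ih =>
    intro a b ha hb hf
    rw [obliczF]
    split
    · rename_i hne
      split
      · rename_i hgt
        rw [ih (a - b) b (by omega) hb (by omega), Int.gcd_sub_self_left]
      · rename_i hle
        rw [ih a (b - a) ha (by omega) (by omega), Int.gcd_comm, Int.gcd_sub_self_left,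
            Int.gcd_comm]
    · rename_i heq
      have : a = b := by omega
      subst this
      rw [Int.gcd_self]
      omega

lemma oblicz_eq_nwd (a b : Int) (ha : 0 < a) (hb : 0 < b) :
    oblicz_najwiekszy_wspolny_dzielnik a b = nwd a b := by
  rw [oblicz_najwiekszy_wspolny_dzielnik, obliczF_eq_gcd _ a b ha hb le_rfl,
      nwd_eq_gcd a b (by omega) (by omega)]

lemma loop_eq (liczby : List Int) (hpos : ∀ y ∈ liczby, 0 < y) :
    ∀ (f idx : Nat) (first dl g : Int) (best : List Int),
      idx ≤ liczby.length →
      2 * (liczby.length - idx) + 1 ≤ f →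
      ((dl = 1 ∧ first = -1 ∧ g = 0) ∨ (2 ≤ dl ∧ 1 < g ∧ 0 < first)) →
      1 ≤ PySem.List.pyGetD best 1 0 →
      loopA liczby f idx first dl g best =
        (let r := (PySem.List.pyRange (idx : Int) (liczby.length : Int) 1).foldl
            (altStep liczby) (first, dl, g, best);
         if r.2.1 > PySem.List.pyGetD r.2.2.2 1 0 then [r.1, r.2.1, r.2.2.1] else r.2.2.2) := by
  intro f
  induction f using Nat.strong_induction_on with
  | _ f ih =>
    intro idx first dl g best hidx hf hinv hbest
    cases f with
    | zero => omega
    | succ f =>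
    by_cases hlt : idx < liczby.length
    case neg =>
      simp only [loopA]
      rw [if_neg (by omega),
          PySem.List.pyRange_one_eq_nil (by exact_mod_cast (by omega : liczby.length ≤ idx))]
      simp only [List.foldl]
    case pos =>
      have hxpos : 0 < PySem.List.pyGetD liczby ((idx : Int)) 0 := by
        rw [PySem.List.pyGetD_natCast, List.getD_eq_getElem _ _ hlt]
        exact hpos _ (List.getElem_mem hlt)
      have hprevpos : 0 < PySem.List.pyGetD liczby ((idx : Int) - 1) 0 := by
        rcases Nat.eq_zero_or_pos idx with h0 | h1
        · subst h0
          rw [show ((0 : Nat) : Int) - 1 = -1 by norm_num,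
              PySem.List.pyGetD_neg_one liczby 0 (List.ne_nil_of_length_pos (by omega))]
          exact hpos _ (List.getLast_mem _)
        · rw [show ((idx : Int) - 1) = ((idx - 1 : Nat) : Int) by omega,
              PySem.List.pyGetD_natCast, List.getD_eq_getElem _ _ (by omega)]
          exact hpos _ (List.getElem_mem (by omega))
      have hcons : PySem.List.pyRange (idx : Int) (liczby.length : Int) 1 =
          (idx : Int) :: PySem.List.pyRange ((idx : Int) + 1) (liczby.length : Int) 1 :=
        PySem.List.pyRange_one_cons (by exact_mod_cast hlt)
      have hcast : ((idx : Int) + 1) = ((idx + 1 : Nat) : Int) := by push_cast; ring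
      rw [hcons]
      simp only [List.foldl_cons, loopA]
      rw [if_pos hlt]
      simp only [altStep]
      rcases hinv with ⟨hdl, hfirst, hg⟩ | ⟨hdl, hg, hfp⟩
      · subst hdl; subst hfirst; subst hg
        rw [oblicz_eq_nwd _ _ hprevpos hxpos]
        simp only [reduceIte]
        by_cases ht : nwd (PySem.List.pyGetD liczby ((idx : Int) - 1) 0)
            (PySem.List.pyGetD liczby (idx : Int) 0) > 1
        · rw [if_pos ht, if_pos ht, hcast]
          exact ih f (by omega) (idx + 1) _ 2 _ best (by omega) (by omega)
            (Or.inr ⟨by norm_num, ht, hprevpos⟩) hbest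
        · rw [if_neg ht, if_neg ht,
              if_neg (show ¬ ((1 : Int) > PySem.List.pyGetD best 1 0) by omega),
              if_pos ht, hcast]
          exact ih f (by omega) (idx + 1) (-1) 1 0 best (by omega) (by omega)
            (Or.inl ⟨rfl, rfl, rfl⟩) hbest
      · have hdlne : ¬ dl = 1 := by omega
        rw [if_neg hdlne, if_neg hdlne, oblicz_eq_nwd g _ (by omega) hxpos]
        by_cases ht : nwd g (PySem.List.pyGetD liczby (idx : Int) 0) > 1
        · rw [if_pos ht, if_pos ht, if_neg (show ¬ first = -1 by omega), hcast]
          exact ih f (by omega) (idx + 1) first (dl + 1) _ best (by omega) (by omega)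
            (Or.inr ⟨by omega, ht, hfp⟩) hbest
        · rw [if_neg ht, if_neg ht, oblicz_eq_nwd _ _ hprevpos hxpos]
          set best' := if dl > PySem.List.pyGetD best 1 0 then [first, dl, g] else best
            with hbestdef
          have hbest' : 1 ≤ PySem.List.pyGetD best' 1 0 := by
            rw [hbestdef]
            split
            · rw [pyGetD_best]; omega
            · exact hbest
          by_cases ht2 : nwd (PySem.List.pyGetD liczby ((idx : Int) - 1) 0)
              (PySem.List.pyGetD liczby (idx : Int) 0) > 1
          · rw [if_neg (not_not_intro ht2), if_pos ht2]
            cases f with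
            | zero => omega
            | succ f2 =>
              simp only [loopA]
              rw [if_pos hlt]
              simp only [reduceIte]
              rw [oblicz_eq_nwd _ _ hprevpos hxpos, if_pos ht2, hcast]
              exact ih f2 (by omega) (idx + 1) _ 2 _ best' (by omega) (by omega)
                (Or.inr ⟨by norm_num, ht2, hprevpos⟩) hbest'
          · rw [if_pos ht2, if_neg ht2, hcast]
            exact ih f (by omega) (idx + 1) (-1) 1 0 best' (by omega) (by omega)
              (Or.inl ⟨rfl, rfl, rfl⟩) hbest'

-- ===== VERDICT (by name: the statement is the Claim_ definition above) =====
theorem podaj_ciag_w_ktorym_nwd_jest_wieksze_od_jeden_spec : Claim_equal_podaj_ciag_w_ktorym_nwd_jest_wieksze_od_jeden := by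
  intro liczby _ hpre
  unfold Spec_podaj_ciag_w_ktorym_nwd_jest_wieksze_od_jeden
  have key := loop_eq liczby hpre (2 * liczby.length + 1) 0 (-1) 1 0 [-1, 1, 0]
    (by omega) (by omega) (Or.inl ⟨rfl, rfl, rfl⟩) (by decide)
  unfold podaj_ciag_w_ktorym_nwd_jest_wieksze_od_jeden
    podaj_ciag_w_ktorym_nwd_jest_wieksze_od_jeden_alt
  simpa using key
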